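-- pv_equiv track=rewrite | github.com/cbrownaz24/vector-coprocessor | bench/gen_scaling_benchmarks.py | linpack_scalar
-- ===== SOURCE A (Python) =====
-- def fmt_words(values: list[int], per_line: int = 8) -> str:
--     out = []
--     for i in range(0, len(values), per_line):
--         chunk = ", ".join(f"{v:4d}" for v in values[i:i+per_line])
--         out.append(f"        .word {chunk}")
--     return "\n".join(out)
--
-- def linpack_data(n: int) -> tuple[list[list[int]], list[int], list[int]]:
--     A = [[i*n + j + 1 for j in range(n)] for i in range(n)]
--     x = [1] * n
--     y = [sum(row) for row in A]   # x is all 1s so y[i] = row sum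
--     return A, x, y
--
-- def linpack_scalar(n: int) -> str:
--     A, x, y = linpack_data(n)
--     flat_A = [v for row in A for v in row]
--     expected_first = y[0]
--     expected_last  = y[n-1]
--     row_bytes = n * 4
--     return f"""//=========================================================================
-- // riscv-bmark-linpack-scalar-{n}x{n}.S - Scalar matvec, N={n}
-- //=========================================================================
--
-- #include "riscv-macros.h"
--
--         TEST_RISCV_BEGIN
--
--         li    x1, 1
--         csrw  10, x1
--         nop; nop; nop; nop; nop
--
--         la    x10, A_data
--         la    x11, x_data
--         la    x12, y_data
--         li    x13, {n}
--
--         li    x5, 0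
-- outer:
--         li    x6, 0
--         slli  x7, x5, {(row_bytes).bit_length()-1}
--         add   x7, x10, x7
--         mv    x8, x11
--         li    x9, 0
-- inner:
--         lw    x14, 0(x7)
--         lw    x15, 0(x8)
--         mul   x16, x14, x15
--         add   x6, x6, x16
--         addi  x7, x7, 4
--         addi  x8, x8, 4
--         addi  x9, x9, 1
--         bne   x9, x13, inner
--
--         slli  x17, x5, 2
--         add   x17, x12, x17
--         sw    x6, 0(x17)
--
--         addi  x5, x5, 1
--         bne   x5, x13, outer
--
--         li    x1, 0
--         csrw  10, x1
--         nop; nop; nop; nop; nop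
--
--         la    x12, y_data
--         lw    x14, 0(x12)
--         TEST_CHECK_EQ(x14, {expected_first})
--         lw    x14, {(n-1)*4}(x12)
--         TEST_CHECK_EQ(x14, {expected_last})
--
--         TEST_RISCV_END
--
--         .data
--         .align 4
-- A_data:
-- {fmt_words(flat_A, per_line=n if n<=16 else 16)}
-- x_data:
-- {fmt_words(x)}
-- y_data:
--         .space {n*4}
-- """
-- ===== SOURCE B (Python) =====
-- def _word_lines(values: list[int], per_line: int) -> str:
--     # build the lines back to front: peel the (possibly short) last chunk off the
--     # end until the list is empty, then join in reverse (per_line >= 1 below)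
--     lines = []
--     while values:
--         k = len(values) % per_line or per_line
--         chunk = values[len(values) - k:]
--         del values[len(values) - k:]
--         lines.append("        .word " + ", ".join(str(v).rjust(4) for v in chunk))
--     return "\n".join(reversed(lines))
--
-- def linpack_scalar(n: int) -> str:
--     # Closed forms: flattening A row-major is exactly 1..n^2, and with x all ones
--     # the first/last checked row sums are n(n+1)/2 and (n-1)n^2 + n(n+1)/2 (Gauss).
--     flat_A = list(range(1, n * n + 1))
--     x = [1] * n
--     s = n * (n + 1) // 2
--     expected_first = s
--     expected_last = (n - 1) * n * n + s
--     shift = (n * 4).bit_length() - 1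
--     head = f"""//=========================================================================
-- // riscv-bmark-linpack-scalar-{n}x{n}.S - Scalar matvec, N={n}
-- //=========================================================================
--
-- #include "riscv-macros.h"
--
--         TEST_RISCV_BEGIN
--
--         li    x1, 1
--         csrw  10, x1
--         nop; nop; nop; nop; nop
--
--         la    x10, A_data
--         la    x11, x_data
--         la    x12, y_data
--         li    x13, {n}
-- """
--     kernel = f"""
--         li    x5, 0
-- outer:
--         li    x6, 0
--         slli  x7, x5, {shift}
--         add   x7, x10, x7
--         mv    x8, x11
--         li    x9, 0
-- inner:
--         lw    x14, 0(x7)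
--         lw    x15, 0(x8)
--         mul   x16, x14, x15
--         add   x6, x6, x16
--         addi  x7, x7, 4
--         addi  x8, x8, 4
--         addi  x9, x9, 1
--         bne   x9, x13, inner
--
--         slli  x17, x5, 2
--         add   x17, x12, x17
--         sw    x6, 0(x17)
--
--         addi  x5, x5, 1
--         bne   x5, x13, outer
-- """
--     checks = f"""
--         li    x1, 0
--         csrw  10, x1
--         nop; nop; nop; nop; nop
--
--         la    x12, y_data
--         lw    x14, 0(x12)
--         TEST_CHECK_EQ(x14, {expected_first})
--         lw    x14, {(n - 1) * 4}(x12)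
--         TEST_CHECK_EQ(x14, {expected_last})
--
--         TEST_RISCV_END
-- """
--     data = f"""
--         .data
--         .align 4
-- A_data:
-- {_word_lines(flat_A, n if n <= 16 else 16)}
-- x_data:
-- {_word_lines(x, 8)}
-- y_data:
--         .space {n * 4}
-- """
--     return head + kernel + checks + data
-- ===== Notes on version B (the rewrite author's own statement) =====
-- stated objective: alternative
-- what changed: Replaces A's nested matrix construction, flattening and per-row summation with closed forms (the flat data is range(1, n*n+1), the checked first/last sums are n*(n+1)//2 and (n-1)*n*n + n*(n+1)//2 by Gauss), emits the text as four concatenated f-string sections instead of one template, and builds the data lines back to front by peeling the last chunk off the list instead of A's forward index-range loop.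
import Mathlib
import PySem

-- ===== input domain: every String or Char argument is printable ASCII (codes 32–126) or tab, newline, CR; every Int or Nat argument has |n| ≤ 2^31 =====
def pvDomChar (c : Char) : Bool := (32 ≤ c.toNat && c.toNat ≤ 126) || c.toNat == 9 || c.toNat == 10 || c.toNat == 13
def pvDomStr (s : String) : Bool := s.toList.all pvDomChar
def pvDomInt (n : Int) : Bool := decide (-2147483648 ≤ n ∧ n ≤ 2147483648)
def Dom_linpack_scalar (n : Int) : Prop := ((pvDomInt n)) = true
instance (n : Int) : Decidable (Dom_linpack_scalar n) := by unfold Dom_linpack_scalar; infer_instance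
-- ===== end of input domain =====

-- B replaces A's matrix build / flatten / row-sum loops by closed forms (the flat data is
-- 1..n^2, the checked sums are Gauss formulas) and emits the same text as four sections,
-- its data lines built back to front by peeling chunks off the end of the list instead of
-- A's forward index-range loop. (_word_lines consumes a list B builds locally; no argument
-- visible to the caller is mutated.)

-- ===== PORT A =====
-- f"{v:4d}": str(v) right-justified to width 4 with spaces (exact for this format spec)
def pvFmt4 (v : Int) : List Char :=
  let s := PySem.Int.toChars v
  List.replicate (4 - s.length) ' ' ++ s

-- fmt_words(values, per_line): for i in range(0, len(values), per_line): emit one ".word" line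
def pvFmtWords (values : List Int) (perLine : Int) : List Char :=
  let out := (PySem.List.pyRange 0 (PySem.List.len values) perLine).foldl
    (fun acc i =>
      acc ++ [("        .word ".toList ++
        PySem.Chars.join (", ".toList)
          ((PySem.List.slice values (some i) (some (i + perLine))).map pvFmt4))])
    ([] : List (List Char))
  PySem.Chars.join ['\n'] out

-- A's single f-string template (row_bytes = n*4 inlined where A binds it)
def pvEmit (n : Int) (flatA x : List Int) (expectedFirst expectedLast : Int) : List Char :=
  let rowBytes := n * 4
  "//=========================================================================\n// riscv-bmark-linpack-scalar-".toList ++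
  PySem.Int.toChars n ++
  "x".toList ++
  PySem.Int.toChars n ++
  ".S - Scalar matvec, N=".toList ++
  PySem.Int.toChars n ++
  "\n//=========================================================================\n\n#include \"riscv-macros.h\"\n\n        TEST_RISCV_BEGIN\n\n        li    x1, 1\n        csrw  10, x1\n        nop; nop; nop; nop; nop\n\n        la    x10, A_data\n        la    x11, x_data\n        la    x12, y_data\n        li    x13, ".toList ++
  PySem.Int.toChars n ++
  "\n\n        li    x5, 0\nouter:\n        li    x6, 0\n        slli  x7, x5, ".toList ++
  PySem.Int.toChars ((PySem.Int.bitLength rowBytes : Int) - 1) ++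
  "\n        add   x7, x10, x7\n        mv    x8, x11\n        li    x9, 0\ninner:\n        lw    x14, 0(x7)\n        lw    x15, 0(x8)\n        mul   x16, x14, x15\n        add   x6, x6, x16\n        addi  x7, x7, 4\n        addi  x8, x8, 4\n        addi  x9, x9, 1\n        bne   x9, x13, inner\n\n        slli  x17, x5, 2\n        add   x17, x12, x17\n        sw    x6, 0(x17)\n\n        addi  x5, x5, 1\n        bne   x5, x13, outer\n\n        li    x1, 0\n        csrw  10, x1\n        nop; nop; nop; nop; nop\n\n        la    x12, y_data\n        lw    x14, 0(x12)\n        TEST_CHECK_EQ(x14, ".toList ++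
  PySem.Int.toChars expectedFirst ++
  ")\n        lw    x14, ".toList ++
  PySem.Int.toChars ((n - 1) * 4) ++
  "(x12)\n        TEST_CHECK_EQ(x14, ".toList ++
  PySem.Int.toChars expectedLast ++
  ")\n\n        TEST_RISCV_END\n\n        .data\n        .align 4\nA_data:\n".toList ++
  pvFmtWords flatA (if n ≤ 16 then n else 16) ++
  "\nx_data:\n".toList ++
  pvFmtWords x 8 ++
  "\ny_data:\n        .space ".toList ++
  PySem.Int.toChars (n * 4) ++
  "\n".toList

def linpack_data (n : Int) : List (List Int) × List Int × List Int :=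
  let A := (PySem.List.pyRange 0 n 1).map (fun i => (PySem.List.pyRange 0 n 1).map (fun j => i * n + j + 1))
  let x := PySem.List.pyRepeat [1] n
  let y := A.map (fun row => row.sum)
  (A, x, y)

def linpack_scalar (n : Int) : String :=
  let t := linpack_data n
  let A := t.1
  let x := t.2.1
  let y := t.2.2
  let flatA := A.flatMap id
  let expectedFirst := PySem.List.pyGetD y 0 0
  let expectedLast := PySem.List.pyGetD y (n - 1) 0
  String.ofList (pvEmit n flatA x expectedFirst expectedLast)

-- ===== PORT B =====
-- str(v).rjust(4)
def pvRjust (w : Nat) (s : List Char) : List Char :=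
  List.replicate (w - s.length) ' ' ++ s

-- one '        .word v, v, …' line for a chunk
def pvWordLine (chunk : List Int) : List Char :=
  "        .word ".toList ++
    PySem.Chars.join (", ".toList) (chunk.map (fun v => pvRjust 4 (PySem.Int.toChars v)))

-- the while loop of _word_lines: peel the last chunk (k = len % p or p) off the end
-- until the list is empty (matches the Python loop; the cons pattern makes the list
-- visibly nonempty so k ≥ 1 and the kept prefix is strictly shorter)
def pvWordLoopR (p : Nat) (lines : List (List Char)) : List Int → List (List Char)
  | [] => lines
  | v :: vs =>
      let k := if (vs.length + 1) % p = 0 then p else (vs.length + 1) % p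
      pvWordLoopR p (lines ++ [pvWordLine ((v :: vs).drop (vs.length + 1 - k))])
        ((v :: vs).take (vs.length + 1 - k))
termination_by values => values.length
decreasing_by
  simp only [List.length_take, List.length_cons]
  split_ifs with h
  · rcases Nat.eq_zero_or_pos p with hp | hp
    · subst hp; simp at h
    · omega
  · have := Nat.pos_of_ne_zero h
    omega

-- _word_lines(values, per_line): lines are built last-first, joined in reverse
def pvWordLines (values : List Int) (p : Nat) : List Char :=
  PySem.Chars.join ['\n'] ((pvWordLoopR p [] values).reverse)

-- the four f-string sections of B
def pvHead (n : Int) : List Char :=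
  "//=========================================================================\n// riscv-bmark-linpack-scalar-".toList ++ PySem.Int.toChars n ++ "x".toList ++ PySem.Int.toChars n ++
  ".S - Scalar matvec, N=".toList ++ PySem.Int.toChars n ++ "\n//=========================================================================\n\n#include \"riscv-macros.h\"\n\n        TEST_RISCV_BEGIN\n\n        li    x1, 1\n        csrw  10, x1\n        nop; nop; nop; nop; nop\n\n        la    x10, A_data\n        la    x11, x_data\n        la    x12, y_data\n        li    x13, ".toList ++ PySem.Int.toChars n ++ "\n".toList

def pvKernel (n : Int) : List Char :=
  "\n        li    x5, 0\nouter:\n        li    x6, 0\n        slli  x7, x5, ".toList ++ PySem.Int.toChars ((PySem.Int.bitLength (n * 4) : Int) - 1) ++ "\n        add   x7, x10, x7\n        mv    x8, x11\n        li    x9, 0\ninner:\n        lw    x14, 0(x7)\n        lw    x15, 0(x8)\n        mul   x16, x14, x15\n        add   x6, x6, x16\n        addi  x7, x7, 4\n        addi  x8, x8, 4\n        addi  x9, x9, 1\n        bne   x9, x13, inner\n\n        slli  x17, x5, 2\n        add   x17, x12, x17\n        sw    x6, 0(x17)\n\n        addi  x5, x5, 1\n        bne   x5, x13, outer\n".t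oList

def pvChecks (n expectedFirst expectedLast : Int) : List Char :=
  "\n        li    x1, 0\n        csrw  10, x1\n        nop; nop; nop; nop; nop\n\n        la    x12, y_data\n        lw    x14, 0(x12)\n        TEST_CHECK_EQ(x14, ".toList ++ PySem.Int.toChars expectedFirst ++ ")\n        lw    x14, ".toList ++
  PySem.Int.toChars ((n - 1) * 4) ++ "(x12)\n        TEST_CHECK_EQ(x14, ".toList ++ PySem.Int.toChars expectedLast ++ ")\n\n        TEST_RISCV_END\n".toList

def pvDataSec (n : Int) (flatA x : List Int) : List Char :=
  "\n        .data\n        .align 4\nA_data:\n".toList ++ pvWordLines flatA (if n ≤ 16 then n.toNat else 16) ++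
  "\nx_data:\n".toList ++ pvWordLines x 8 ++
  "\ny_data:\n        .space ".toList ++ PySem.Int.toChars (n * 4) ++ "\n".toList

def linpack_scalar_alt (n : Int) : String :=
  let flatA := PySem.List.pyRange 1 (n * n + 1) 1
  let x := PySem.List.pyRepeat [1] n
  let s := PySem.Int.floordiv (n * (n + 1)) 2
  String.ofList
    (pvHead n ++ pvKernel n ++ pvChecks n s ((n - 1) * n * n + s) ++ pvDataSec n flatA x)

-- ===== PRECONDITION & SPEC =====
-- Pre_ excludes n ≤ 0, on which A raises IndexError (y is empty, so y[0] fails).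
def Pre_linpack_scalar (n : Int) : Prop := 1 ≤ n
instance (n : Int) : Decidable (Pre_linpack_scalar n) := by unfold Pre_linpack_scalar; infer_instance
def pvWitness_linpack_scalar : Int := (3)

def Spec_linpack_scalar (n : Int) (out : String) : Prop := out = linpack_scalar_alt n
instance (n : Int) (out : String) : Decidable (Spec_linpack_scalar n out) := by unfold Spec_linpack_scalar; infer_instance

-- ===== CLAIM (what is proved, stated in full; the proofs are below) =====
def Claim_equal_linpack_scalar : Prop := ∀ (n : Int), Dom_linpack_scalar n → Pre_linpack_scalar n → Spec_linpack_scalar n (linpack_scalar n)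
-- ===== LEMMAS AND PROOFS =====

-- proof-only helper: the chunk list values[:p], values[p:p+p], … (head/tail form like pvWordLoop)
def pvChunksAux (p : Nat) : List Int → List (List Int)
  | [] => []
  | v :: vs => (v :: vs.take (p - 1)) :: pvChunksAux p (vs.drop (p - 1))
termination_by values => values.length
decreasing_by simp

-- Gauss: sum over one matrix row (offset c = i*n), Nat-range core
lemma pv_sum_core (c : Int) (m : Nat) :
    ((List.range m).map (fun k : Nat => c + ((0:Int) + (k:Int)) + 1)).sum
      = (m : Int) * c + (m : Int) * ((m : Int) + 1) / 2 := by
  induction m with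
  | zero => simp
  | succ m ih =>
    have hT : ((m:Int) + 1) * (((m:Int) + 1) + 1) / 2 = (m:Int) * ((m:Int) + 1) / 2 + ((m:Int) + 1) := by
      rw [show ((m:Int) + 1) * (((m:Int) + 1) + 1) = (m:Int) * ((m:Int) + 1) + ((m:Int) + 1) * 2 by ring,
        Int.add_mul_ediv_right _ _ (by norm_num)]
    have hc : ((m + 1 : Nat) : Int) = (m : Int) + 1 := by push_cast; ring
    rw [List.range_succ, List.map_append, List.sum_append, ih, hc, hT]
    simp only [List.map_cons, List.map_nil, List.sum_cons, List.sum_nil]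
    ring

-- sum of row i of A: i*n*n + n*(n+1)/2
lemma pv_row_sum (n i : Int) (hn : 0 ≤ n) :
    ((PySem.List.pyRange 0 n 1).map (fun j => i * n + j + 1)).sum
      = i * n * n + n * (n + 1) / 2 := by
  obtain ⟨m, rfl⟩ : ∃ m : Nat, n = (m : Int) := ⟨n.toNat, (Int.toNat_of_nonneg hn).symm⟩
  rw [PySem.List.pyRange_one]
  have hm : (((m : Int)) - 0).toNat = m := by omega
  rw [hm, List.map_map]
  have hc : ((fun j => i * (m:Int) + j + 1) ∘ fun k : Nat => (0:Int) + (k:Int))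
      = fun k : Nat => (i * (m:Int)) + ((0:Int) + (k:Int)) + 1 := by
    funext k; simp [Function.comp]
  rw [hc, pv_sum_core (i * (m:Int)) m]
  ring

-- outer-loop invariant for the flattening: the first k rows flatten to 1..k*m
lemma pv_flat_aux (m : Nat) (k : Nat) :
    ((List.range k).map
        (fun i : Nat => ((List.range m).map (fun k : Nat => (0:Int) + (k:Int))).map
          (fun j => ((0:Int) + (i:Int)) * (m:Int) + j + 1))).flatMap id
      = PySem.List.pyRange 1 ((k : Int) * (m:Int) + 1) 1 := by
  induction k with
  | zero => simp [PySem.List.pyRange_one_eq_nil]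
  | succ k ih =>
    have hkm := Int.natCast_nonneg (k * m)
    have hm0 := Int.natCast_nonneg m
    have h1 : (1:Int) ≤ (k:Int) * (m:Int) + 1 := by push_cast at hkm; omega
    have h2 : (k:Int) * (m:Int) + 1 ≤ ((k:Int) + 1) * (m:Int) + 1 := by nlinarith
    rw [List.range_succ, List.map_append, List.flatMap_append, ih]
    push_cast
    rw [PySem.List.pyRange_one_append 1 ((k:Int) * (m:Int) + 1) (((k:Int) + 1) * (m:Int) + 1) h1 h2]
    congr 1
    simp only [List.map_cons, List.map_nil, List.flatMap_cons, List.flatMap_nil, id, List.append_nil]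
    rw [PySem.List.pyRange_one (a := (k:Int) * (m:Int) + 1) (b := ((k:Int) + 1) * (m:Int) + 1)]
    have hm2 : ((((k:Int) + 1) * (m:Int) + 1) - ((k:Int) * (m:Int) + 1)).toNat = m := by
      have : (((k:Int) + 1) * (m:Int) + 1) - ((k:Int) * (m:Int) + 1) = (m:Int) := by ring
      rw [this]; omega
    rw [hm2, List.map_map]
    apply List.map_congr_left
    intro x hx
    simp [Function.comp]
    ring

-- flattening A row-major is 1..n^2
lemma pv_flat (n : Int) (hn : 0 ≤ n) :
    (((PySem.List.pyRange 0 n 1).map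
        (fun i => (PySem.List.pyRange 0 n 1).map (fun j => i * n + j + 1))).flatMap id)
      = PySem.List.pyRange 1 (n * n + 1) 1 := by
  obtain ⟨m, rfl⟩ : ∃ m : Nat, n = (m : Int) := ⟨n.toNat, (Int.toNat_of_nonneg hn).symm⟩
  rw [PySem.List.pyRange_one (a := 0) (b := (m:Int))]
  have hm : (((m : Int)) - 0).toNat = m := by omega
  rw [hm, List.map_map]
  have hc : ((fun i => ((List.range m).map (fun k : Nat => (0:Int) + (k:Int))).map
        (fun j => i * (m:Int) + j + 1)) ∘ fun k : Nat => (0:Int) + (k:Int))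
      = fun i : Nat => ((List.range m).map (fun k : Nat => (0:Int) + (k:Int))).map
          (fun j => ((0:Int) + (i:Int)) * (m:Int) + j + 1) := by
    funext i; rfl
  rw [hc, pv_flat_aux m m]

-- y[i] via the comprehension-index lemma, then the row sum
lemma pv_getD_row (n i : Int) (h0 : 0 ≤ i) (hi : i < n) :
    PySem.List.pyGetD
        (((PySem.List.pyRange 0 n 1).map
            (fun i => (PySem.List.pyRange 0 n 1).map (fun j => i * n + j + 1))).map
          (fun row => row.sum)) i 0
      = i * n * n + n * (n + 1) / 2 := by
  rw [List.map_map]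
  rw [PySem.List.pyGetD_map_pyRange_of_nonneg _ n i 0 h0 hi]
  simp only [Function.comp]
  exact pv_row_sum n i (by omega)

-- range(a, b, s) for positive s splits off its head
lemma pv_pyRange_pos_cons (a b s : Int) (hs : 0 < s) (hab : a < b) :
    PySem.List.pyRange a b s = a :: PySem.List.pyRange (a + s) b s := by
  rw [PySem.List.pyRange_of_pos _ _ hs, PySem.List.pyRange_of_pos _ _ hs, if_pos hab]
  have hq1 : 1 ≤ (b - a + s - 1) / s := by
    rw [Int.le_ediv_iff_mul_le hs]; omega
  have hc1 : (b - a + s - 1) / s - 1 = (b - a - 1) / s := by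
    rw [show b - a + s - 1 = (b - a - 1) + 1 * s from by ring,
      Int.add_mul_ediv_right _ _ (by omega)]
    ring
  have hm : ((b - a + s - 1) / s).toNat = ((b - a - 1) / s).toNat + 1 := by omega
  rw [hm, List.range_succ_eq_map, List.map_cons, List.map_map]
  congr 1
  · simp
  · by_cases hab2 : a + s < b
    · rw [if_pos hab2, show b - (a + s) + s - 1 = b - a - 1 from by ring]
      apply List.map_congr_left
      intro k _
      simp [Function.comp, Nat.succ_eq_add_one]
      ring
    · rw [if_neg hab2]
      have hq2 : (b - a + s - 1) / s < 2 := by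
        rw [Int.ediv_lt_iff_lt_mul hs]; omega
      have h0 : ((b - a - 1) / s).toNat = 0 := by omega
      rw [h0]
      simp
lemma pv_pyRange_shift (b c s : Int) (hs : 0 < s) :
    PySem.List.pyRange c b s = (PySem.List.pyRange 0 (b - c) s).map (· + c) := by
  rw [PySem.List.pyRange_of_pos _ _ hs, PySem.List.pyRange_of_pos _ _ hs, List.map_map]
  have hif : (if c < b then ((b - c + s - 1) / s).toNat else 0)
      = (if (0:Int) < b - c then ((b - c - 0 + s - 1) / s).toNat else 0) := by
    by_cases h : c < b
    · rw [if_pos h, if_pos (by omega)]; congr 2; ring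
    · rw [if_neg h, if_neg (by omega)]
  rw [hif]
  apply List.map_congr_left
  intro k _
  simp [Function.comp]
  ring

-- A's sliced index loop produces exactly the chunk list
lemma pv_chunk_map {α : Type} (g : List Int → α) (p : Nat) (hp : 0 < p) :
    ∀ (fuel : Nat) (values : List Int), values.length ≤ fuel →
      (PySem.List.pyRange 0 (PySem.List.len values) (p : Int)).map
          (fun i => g (PySem.List.slice values (some i) (some (i + (p : Int)))))
        = (pvChunksAux p values).map g := by
  obtain ⟨p', rfl⟩ : ∃ p', p = p' + 1 := ⟨p - 1, by omega⟩
  intro fuel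
  induction fuel with
  | zero =>
    intro values h
    have hv : values = [] := by cases values <;> simp at h ⊢
    subst hv
    rw [PySem.List.pyRange_of_pos _ _ (by exact_mod_cast hp), if_neg (by simp [PySem.List.len])]
    simp [pvChunksAux]
  | succ fuel ih =>
    intro values h
    cases values with
    | nil =>
      rw [PySem.List.pyRange_of_pos _ _ (by exact_mod_cast hp), if_neg (by simp [PySem.List.len])]
      simp [pvChunksAux]
    | cons v vs =>
      have hL : PySem.List.len (v :: vs) = ((vs.length + 1 : Nat) : Int) := by
        simp [PySem.List.len]
      rw [hL, pv_pyRange_pos_cons 0 _ _ (by exact_mod_cast hp) (by positivity), List.map_cons]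
      rw [pv_pyRange_shift _ _ _ (by exact_mod_cast hp), List.map_map]
      rw [show pvChunksAux (p' + 1) (v :: vs)
            = (v :: vs.take p') :: pvChunksAux (p' + 1) (vs.drop p') from by
          simp [pvChunksAux]]
      rw [List.map_cons]
      congr 1
      · -- head chunk: values[0:p] = v :: vs.take p'
        have h0p : (0:Int) + ((p' + 1 : Nat) : Int) = ((p' + 1 : Nat) : Int) := by ring
        rw [h0p]
        have hsl := PySem.List.slice_natCast (v :: vs) 0 (p' + 1)
        simp only [Nat.cast_zero] at hsl
        rw [hsl]
        simp [List.take_succ_cons]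
      · -- tail chunks
        have hdrop : (vs.drop p').length ≤ fuel := by
          simp at h ⊢; omega
        rw [← ih (vs.drop p') hdrop]
        by_cases hvp : p' ≤ vs.length
        · have hlen : ((vs.length + 1 : Nat) : Int) - (0 + ((p' + 1 : Nat) : Int))
              = PySem.List.len (vs.drop p') := by
            simp [PySem.List.len]
            omega
          rw [hlen]
          apply List.map_congr_left
          intro i hi
          have hi0 : (0:Int) ≤ i :=
            ((PySem.List.mem_pyRange_iff_of_pos
              (show (0:Int) < ((p' + 1 : Nat) : Int) by exact_mod_cast hp) i).1 hi).1
          obtain ⟨m, rfl⟩ : ∃ m : Nat, i = (m : Int) := ⟨i.toNat, (Int.toNat_of_nonneg hi0).symm⟩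
          simp only [Function.comp]
          congr 1
          have h1 : (m : Int) + (0 + ((p' + 1 : Nat) : Int)) = ((m + (p' + 1) : Nat) : Int) := by
            push_cast; ring
          rw [h1, PySem.List.slice_natCast_add, PySem.List.slice_natCast_add]
          congr 1
          conv_rhs => rw [List.drop_drop]
          rw [show m + (p' + 1) = (p' + m) + 1 from by omega, List.drop_succ_cons]
        · -- vs shorter than p': both ranges are empty
          have hd : vs.drop p' = [] := List.drop_eq_nil_of_le (by omega)
          rw [hd]
          rw [PySem.List.pyRange_of_pos _ _ (by exact_mod_cast hp),
            if_neg (by push_cast; omega)]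
          rw [PySem.List.pyRange_of_pos _ _ (by exact_mod_cast hp),
            if_neg (by simp [PySem.List.len])]
          simp

-- proof-only: the size of the chunk the back-to-front loop peels (len % p or p)
def pvKOf (p L : Nat) : Nat := if L % p = 0 then p else L % p

-- front chunking ends with the chunk the back-to-front loop peels first
lemma pv_chunks_snoc (p : Nat) (hp : 0 < p) :
    ∀ (fuel : Nat) (v : Int) (vs : List Int), (v :: vs).length ≤ fuel →
      pvChunksAux p (v :: vs)
        = pvChunksAux p ((v :: vs).take ((v :: vs).length - pvKOf p (v :: vs).length))
          ++ [(v :: vs).drop ((v :: vs).length - pvKOf p (v :: vs).length)] := by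
  obtain ⟨p', rfl⟩ : ∃ p', p = p' + 1 := ⟨p - 1, by omega⟩
  intro fuel
  induction fuel with
  | zero => intro v vs h; simp at h
  | succ fuel ih =>
    intro v vs h
    have hstep : pvChunksAux (p' + 1) (v :: vs)
        = (v :: vs.take p') :: pvChunksAux (p' + 1) (vs.drop p') := by
      simp [pvChunksAux]
    set L := (v :: vs).length with hLdef
    have hL1 : L = vs.length + 1 := by simp [hLdef]
    by_cases hle : L ≤ p' + 1
    · -- single chunk: the peeled chunk is the whole list
      have hk : pvKOf (p' + 1) L = L := by
        unfold pvKOf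
        rcases Nat.lt_or_ge L (p' + 1) with hlt | hge
        · rw [if_neg (by rw [Nat.mod_eq_of_lt hlt]; omega), Nat.mod_eq_of_lt hlt]
        · have hLp : L = p' + 1 := by omega
          rw [hLp]; simp
      rw [hk]
      simp only [Nat.sub_self, List.take_zero, List.drop_zero]
      rw [hstep]
      have hvt : vs.take p' = vs := List.take_of_length_le (by omega)
      have hvd : vs.drop p' = [] := List.drop_eq_nil_of_le (by omega)
      rw [hvd]
      simp [pvChunksAux, hvt]
    · -- more than one chunk: recurse on the tail after the first chunk
      rw [not_le] at hle
      obtain ⟨w, ws, hws⟩ : ∃ w ws, vs.drop p' = w :: ws := by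
        cases hd : vs.drop p' with
        | nil =>
          have := List.drop_eq_nil_iff.mp hd
          omega
        | cons w ws => exact ⟨w, ws, rfl⟩
      have hrl : (w :: ws).length = L - (p' + 1) := by
        rw [← hws, List.length_drop]; omega
      have hfuel : (w :: ws).length ≤ fuel := by
        rw [hrl]; omega
      set k := pvKOf (p' + 1) L with hkdef
      have hkle : k ≤ p' + 1 ∧ 0 < k := by
        rw [hkdef]
        unfold pvKOf
        split_ifs with hz
        · exact ⟨le_refl _, Nat.succ_pos _⟩
        · exact ⟨le_of_lt (Nat.mod_lt _ (Nat.succ_pos _)), Nat.pos_of_ne_zero hz⟩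
      have hdvd : (L - k) % (p' + 1) = 0 := by
        rw [hkdef]
        unfold pvKOf
        split_ifs with hz
        · rw [← Nat.mod_eq_sub_mod (by omega)]; exact hz
        · have hsub : L - L % (p' + 1) = (p' + 1) * (L / (p' + 1)) := by
            have := Nat.div_add_mod L (p' + 1)
            omega
          rw [hsub, Nat.mul_mod_right]
      have hLkp : p' + 1 ≤ L - k := by
        rcases Nat.lt_or_ge (L - k) (p' + 1) with hlt | hge
        · exfalso
          rw [Nat.mod_eq_of_lt hlt] at hdvd
          omega
        · exact hge
      have hkeq : pvKOf (p' + 1) (L - (p' + 1)) = k := by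
        rw [hkdef]
        unfold pvKOf
        rw [← Nat.mod_eq_sub_mod (by omega)]
      have e1 : pvChunksAux (p' + 1) ((v :: vs).take (L - k))
          = (v :: vs.take p')
            :: pvChunksAux (p' + 1) ((vs.drop p').take (L - (p' + 1) - k)) := by
        obtain ⟨u, us, hus⟩ : ∃ u us, (v :: vs).take (L - k) = u :: us := by
          cases ht : (v :: vs).take (L - k) with
          | nil =>
            have := congrArg List.length ht
            simp at this
            omega
          | cons u us => exact ⟨u, us, rfl⟩
        rw [hus]
        have hu : u :: us = (v :: vs).take (L - k) := hus.symm
        have hstep2 : pvChunksAux (p' + 1) (u :: us)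
            = (u :: us.take p') :: pvChunksAux (p' + 1) (us.drop p') := by
          simp [pvChunksAux]
        rw [hstep2]
        congr 1
        · -- first chunk of the kept prefix is the first chunk of the list
          have hq : (u :: us).take (p' + 1) = (v :: vs).take (p' + 1) := by
            rw [hu, List.take_take, Nat.min_eq_left hLkp]
          simpa [List.take_succ_cons] using hq
        · -- the rest of the kept prefix
          have hq : (u :: us).drop (p' + 1) = ((v :: vs).drop (p' + 1)).take (L - k - (p' + 1)) := by
            rw [hu, List.drop_take]
          simp only [List.drop_succ_cons] at hq
          rw [hq]
          congr 2
          omega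
      have e2 : (v :: vs).drop (L - k) = (vs.drop p').drop (L - (p' + 1) - k) := by
        rw [show vs.drop p' = (v :: vs).drop (p' + 1) from rfl, List.drop_drop]
        congr 1
        omega
      rw [hws] at e1 e2
      rw [hstep, hws, ih w ws hfuel, hrl, hkeq, e1, e2]
      simp

-- the back-to-front loop with its accumulator produces the reversed chunk lines
lemma pv_loopR_acc (p : Nat) (hp : 0 < p) :
    ∀ (fuel : Nat) (values : List Int), values.length ≤ fuel → ∀ (acc : List (List Char)),
      pvWordLoopR p acc values = acc ++ ((pvChunksAux p values).map pvWordLine).reverse := by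
  intro fuel
  induction fuel with
  | zero =>
    intro values h acc
    have hv : values = [] := by cases values <;> simp at h ⊢
    subst hv
    simp [pvWordLoopR, pvChunksAux]
  | succ fuel ih =>
    intro values h acc
    cases values with
    | nil => simp [pvWordLoopR, pvChunksAux]
    | cons v vs =>
      rw [show pvWordLoopR p acc (v :: vs)
            = pvWordLoopR p
                (acc ++ [pvWordLine ((v :: vs).drop ((vs.length + 1) - pvKOf p (vs.length + 1)))])
                ((v :: vs).take ((vs.length + 1) - pvKOf p (vs.length + 1))) from by
          simp only [pvWordLoopR, pvKOf]]
      have hk1 : 0 < pvKOf p (vs.length + 1) := by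
        unfold pvKOf
        split_ifs with hz
        · rcases Nat.eq_zero_or_pos p with hp0 | hp0
          · subst hp0; simp at hz
          · exact hp0
        · exact Nat.pos_of_ne_zero hz
      have hfl : ((v :: vs).take ((vs.length + 1) - pvKOf p (vs.length + 1))).length ≤ fuel := by
        simp at h ⊢
        omega
      rw [ih _ hfl]
      rw [pv_chunks_snoc p hp (v :: vs).length v vs le_rfl]
      simp [List.length_cons]

lemma pv_fmtWords_eq (values : List Int) (p : Nat) (hp : 0 < p) :
    pvFmtWords values (p : Int) = pvWordLines values p := by
  unfold pvFmtWords pvWordLines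
  rw [PySem.List.foldl_append_singleton_eq_map]
  simp only [List.nil_append]
  congr 1
  rw [pv_loopR_acc p hp values.length values le_rfl [], List.nil_append, List.reverse_reverse]
  rw [← pv_chunk_map pvWordLine p hp values.length values le_rfl]
  apply List.map_congr_left
  intro i _
  unfold pvWordLine
  rw [show pvFmt4 = fun v => pvRjust 4 (PySem.Int.toChars v) from by
    funext v; simp [pvFmt4, pvRjust]]
-- ===== VERDICT =====
set_option maxRecDepth 10000 in
set_option maxHeartbeats 2000000 in
theorem linpack_scalar_spec : Claim_equal_linpack_scalar := by
  intro n _hD hP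
  unfold Pre_linpack_scalar at hP
  unfold Spec_linpack_scalar linpack_scalar linpack_scalar_alt linpack_data pvEmit pvHead pvKernel pvChecks pvDataSec
  simp only []
  have hn0 : (0:Int) ≤ n := by omega
  have e2 : PySem.List.pyGetD
      (((PySem.List.pyRange 0 n 1).map
          (fun i => (PySem.List.pyRange 0 n 1).map (fun j => i * n + j + 1))).map
        (fun row => row.sum)) 0 0 = PySem.Int.floordiv (n * (n + 1)) 2 := by
    rw [pv_getD_row n 0 le_rfl (by omega), PySem.Int.floordiv_eq_ediv_of_pos (by norm_num)]
    ring
  have e3 : PySem.List.pyGetD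
      (((PySem.List.pyRange 0 n 1).map
          (fun i => (PySem.List.pyRange 0 n 1).map (fun j => i * n + j + 1))).map
        (fun row => row.sum)) (n - 1) 0
      = (n - 1) * n * n + PySem.Int.floordiv (n * (n + 1)) 2 := by
    rw [pv_getD_row n (n - 1) (by omega) (by omega), PySem.Int.floordiv_eq_ediv_of_pos (by norm_num)]
  have hper : (if n ≤ 16 then n else 16) = (((if n ≤ 16 then n.toNat else 16) : Nat) : Int) := by
    split_ifs <;> omega
  have h8 : (8:Int) = ((8 : Nat) : Int) := by norm_num
  rw [pv_flat n hn0, e2, e3, hper, h8,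
    pv_fmtWords_eq _ _ (by split_ifs <;> omega),
    pv_fmtWords_eq _ 8 (by norm_num)]
  rw [show "\n\n        li    x5, 0\nouter:\n        li    x6, 0\n        slli  x7, x5, ".toList = "\n".toList ++ "\n        li    x5, 0\nouter:\n        li    x6, 0\n        slli  x7, x5, ".toList from by decide,
    show "\n        add   x7, x10, x7\n        mv    x8, x11\n        li    x9, 0\ninner:\n        lw    x14, 0(x7)\n        lw    x15, 0(x8)\n        mul   x16, x14, x15\n        add   x6, x6, x16\n        addi  x7, x7, 4\n        addi  x8, x8, 4\n        addi  x9, x9, 1\n        bne   x9, x13, inner\n\n        slli  x17, x5, 2\n        add   x17, x12, x17\n        sw    x6, 0(x17)\n\n        addi  x5, x5, 1\n        bne   x5, x13, outer\n\n        li    x1, 0\n        csrw  10, x1\n        nop; nop; nop; nop; nop\n\n        la    x12, y_data\n        lw    x14, 0(x12)\n        TEST_CHECK_EQ(x14, ".toList = "\n        add   x7, x10, x7\n        mv    x8, x11\n        li    x9, 0\ninner:\n        lw    x14, 0(x7)\n        lw    x15, 0(x8)\n        mul   x16, x14, x15\n        add   x6, x6, x16\n        addi  x7, x7, 4\n        addi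  x8, x8, 4\n        addi  x9, x9, 1\n        bne   x9, x13, inner\n\n        slli  x17, x5, 2\n        add   x17, x12, x17\n        sw    x6, 0(x17)\n\n        addi  x5, x5, 1\n        bne   x5, x13, outer\n".toList ++ "\n        li    x1, 0\n        csrw  10, x1\n        nop; nop; nop; nop; nop\n\n        la    x12, y_data\n        lw    x14, 0(x12)\n        TEST_CHECK_EQ(x14, ".toList from by decide,
    show ")\n\n        TEST_RISCV_END\n\n        .data\n        .align 4\nA_data:\n".toList = ")\n\n        TEST_RISCV_END\n".toList ++ "\n        .data\n        .align 4\nA_data:\n".toList from by decide]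
  simp only [List.append_assoc]
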